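-- pv_equiv track=rewrite | github.com/NikitaKums/TalTech | iti0102/EX07A/popular_names.py | names_by_popularity
-- ===== SOURCE A (Python) =====
-- def names_by_popularity(names_dict: dict) -> str:
--     r"""
--     Create a string used to print the names by popularity.
--
--     Format:
--         1. name: number of people + "\n"
--         ...
--
--     Example:
--         1. Kati: 100
--         2. Mati: 90
--         3. Nati: 80
--         ...
--
--     :param names_dict: dictionary of the names
--     :return: string
--     """
--     dict_copy = dict(names_dict)
--     i = 0
--     popularity_list = []
--     while i < len(names_dict):
--         a = max(dict_copy, key=dict_copy.get)  # get key(name) that is most popular in list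
--         b = dict_copy[a]  # get the value of most popular name
--         del dict_copy[a]  # remove most popular name
--         popularity_list.append(str(1 + i) + ". " + a + ": ")
--         popularity_list.append(str(b))
--         popularity_list.append("\n")
--         i += 1
--     return "".join(popularity_list)
-- ===== SOURCE B (Python) =====
-- def names_by_popularity(names_dict: dict) -> str:
--     ranked = sorted(names_dict.items(), key=lambda kv: kv[1], reverse=True)
--     out = []
--     for i, (name, count) in enumerate(ranked):
--         out.append(str(1 + i) + ". " + name + ": " + str(count) + "\n")
--     return "".join(out)
-- ===== Notes on version B (the rewrite author's own statement) =====
-- stated objective: faster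
-- what changed: Replaces the quadratic repeated max-scan-and-delete over a shrinking dict copy with one stable descending sort of the items followed by a single linear formatting pass.
import Mathlib
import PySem

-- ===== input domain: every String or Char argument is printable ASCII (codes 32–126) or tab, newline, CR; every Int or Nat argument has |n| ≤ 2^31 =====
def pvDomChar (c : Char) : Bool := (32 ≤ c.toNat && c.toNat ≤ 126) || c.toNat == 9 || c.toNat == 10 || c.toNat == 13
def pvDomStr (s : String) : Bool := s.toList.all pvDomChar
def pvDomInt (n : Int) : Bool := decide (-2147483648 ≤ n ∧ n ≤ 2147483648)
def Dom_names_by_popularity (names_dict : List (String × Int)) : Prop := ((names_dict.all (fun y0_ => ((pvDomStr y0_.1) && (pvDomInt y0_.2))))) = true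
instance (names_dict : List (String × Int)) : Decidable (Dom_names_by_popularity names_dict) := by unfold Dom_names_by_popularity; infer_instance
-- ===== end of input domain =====

-- B replaces A's repeated max-scan-and-delete over a shrinking dict copy with one stable
-- descending sort of the items plus a single formatting pass (objective: faster).


-- ===== PORT A =====
-- the while loop: rem = len(names_dict) - i iterations remain; i is the Python counter
def nbpLoop (d : PySem.Dict String Int) (i : Int) (rem : Nat) (acc : List String) : List String :=
  match rem with
  | 0 => acc
  | r + 1 =>
    match PySem.List.max? d.keys (fun k => d.getD k 0) with
    | none => acc
    | some a =>
      let b := d.getD a 0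
      nbpLoop (d.erase a) (i + 1) r
        (acc ++ [PySem.Int.toStr (1 + i) ++ ". " ++ a ++ ": ", PySem.Int.toStr b, "\n"])

-- dict_copy = dict(names_dict) is PySem.Dict.mk names_dict
def names_by_popularity (names_dict : List (String × Int)) : String :=
  PySem.Str.join "" (nbpLoop (PySem.Dict.mk names_dict) 0 names_dict.length [])

-- ===== PORT B =====
def names_by_popularity_alt (names_dict : List (String × Int)) : String :=
  PySem.Str.join ""
    ((PySem.List.enumerate (PySem.List.sorted names_dict (fun kv => kv.2) true) 0).foldl
      (fun acc p => acc ++ [PySem.Int.toStr (1 + p.1) ++ ". " ++ p.2.1 ++ ": " ++ PySem.Int.toStr p.2.2 ++ "\n"]) [])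

-- ===== PRECONDITION & SPEC =====
-- Pre_: the Python parameter is a dict, whose keys are unique; association lists with a
-- duplicated first component do not represent any Python dict and are excluded.
def Pre_names_by_popularity (names_dict : List (String × Int)) : Prop :=
  (names_dict.map Prod.fst).Nodup

instance (names_dict : List (String × Int)) : Decidable (Pre_names_by_popularity names_dict) := by
  unfold Pre_names_by_popularity; infer_instance

def pvWitness_names_by_popularity : (List (String × Int)) := [("Kati", 100), ("Mati", 90), ("Nati", 90)]

def Spec_names_by_popularity (names_dict : List (String × Int)) (out : String) : Prop := out = names_by_popularity_alt names_dict
instance (names_dict : List (String × Int)) (out : String) : Decidable (Spec_names_by_popularity names_dict out) := by unfold Spec_names_by_popularity; infer_instance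

-- ===== CLAIM (what is proved, stated in full; the proofs are below) =====
def Claim_equal_names_by_popularity : Prop := ∀ (names_dict : List (String × Int)), Dom_names_by_popularity names_dict → Pre_names_by_popularity names_dict → Spec_names_by_popularity names_dict (names_by_popularity names_dict)

-- ===== LEMMAS AND PROOFS =====

def tk {α : Type} (L : Int) (key : α → Int) (p : Int × α) : Int := -(key p.2) * L + p.1

theorem tk_lt_iff {α : Type} (L : Int) (key : α → Int) (x y : Int × α)
    (hji : y.1 < x.1) (hgap : x.1 - y.1 < L) :
    (tk L key x < tk L key y) ↔ key y.2 < key x.2 := by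
  have hL : 0 < L := by omega
  unfold tk
  constructor
  · intro h
    by_contra hc
    have hc' : key x.2 ≤ key y.2 := by omega
    have := mul_le_mul_of_nonneg_right hc' hL.le
    nlinarith
  · intro h
    have h1 : key y.2 + 1 ≤ key x.2 := by omega
    have := mul_le_mul_of_nonneg_right h1 hL.le
    nlinarith

theorem insertBy_tag_comm {α : Type} (L : Int) (key : α → Int) (x : Int × α) (ts : List (Int × α))
    (h : ∀ q ∈ ts, q.1 < x.1 ∧ x.1 - q.1 < L) :
    PySem.List.insertBy (fun a b => decide (key b < key a)) x.2 (ts.map (·.2))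
      = (PySem.List.insertBy (fun a b => decide (tk L key a < tk L key b)) x ts).map (·.2) := by
  induction ts with
  | nil => rfl
  | cons y ys ih =>
    obtain ⟨h1, h2⟩ := h y (by simp)
    simp only [List.map_cons, PySem.List.insertBy]
    by_cases hk : key y.2 < key x.2
    · have ht : tk L key x < tk L key y := (tk_lt_iff L key x y h1 h2).2 hk
      simp [hk, ht]
    · have ht : ¬ tk L key x < tk L key y := fun c => hk ((tk_lt_iff L key x y h1 h2).1 c)
      simp only [hk, ht, decide_false, Bool.false_eq_true, if_false, List.map_cons]
      rw [ih (fun q hq => h q (by simp [hq]))]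

theorem mem_foldl_insertBy {α : Type} (before : α → α → Bool) (ts : List α) (acc : List α) (y : α) :
    y ∈ ts.foldl (fun acc x => PySem.List.insertBy before x acc) acc ↔ y ∈ acc ∨ y ∈ ts := by
  induction ts generalizing acc with
  | nil => simp
  | cons z zs ih =>
    simp only [List.foldl_cons, ih, PySem.List.mem_insertBy, List.mem_cons]
    tauto

theorem sorted_map_tag {α : Type} (L : Int) (key : α → Int) (ts : List (Int × α))
    (hmono : ts.Pairwise (fun p q => p.1 < q.1))
    (hgap : ∀ p ∈ ts, ∀ q ∈ ts, p.1 - q.1 < L) :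
    PySem.List.sorted (ts.map (·.2)) key true
      = (PySem.List.sorted ts (tk L key) false).map (·.2) := by
  rw [PySem.List.sorted_rev_eq_foldl_insertBy, PySem.List.sorted_eq_foldl_insertBy]
  induction ts using List.reverseRecOn with
  | nil => rfl
  | append_singleton ts x ih =>
    rw [List.pairwise_append] at hmono
    rw [List.map_append, List.foldl_append, List.foldl_append]
    simp only [List.map_cons, List.map_nil, List.foldl_cons, List.foldl_nil]
    rw [ih hmono.1 (fun p hp q hq => hgap p (by simp [hp]) q (by simp [hq]))]
    exact (insertBy_tag_comm L key x _ (fun q hq => by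
      have hqts : q ∈ ts := by
        have := (mem_foldl_insertBy _ ts [] q).1 hq
        simpa using this
      exact ⟨hmono.2.2 q hqts x (by simp), hgap x (by simp) q (by simp [hqts])⟩))

theorem pairwise_lt_of_pairwise_le {β : Type} (g : β → Int) (r : List β)
    (h1 : r.Pairwise (fun a b => g a ≤ g b)) (h2 : r.Nodup)
    (hinj : ∀ p ∈ r, ∀ q ∈ r, g p = g q → p = q) :
    r.Pairwise (fun a b => g a < g b) := by
  induction r with
  | nil => exact List.Pairwise.nil
  | cons a t ih =>
    rw [List.pairwise_cons] at h1 ⊢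
    rw [List.nodup_cons] at h2
    refine ⟨fun b hb => ?_, ih h1.2 h2.2 (fun p hp q hq => hinj p (by simp [hp]) q (by simp [hq]))⟩
    rcases lt_or_eq_of_le (h1.1 b hb) with h | h
    · exact h
    · exact absurd (hinj a (by simp) b (by simp [hb]) h) (fun e => h2.1 (e ▸ hb))

theorem eq_of_fst_eq_of_pairwise {α : Type} (r : List (Int × α)) (hp : r.Pairwise (fun p q => p.1 < q.1))
    (p : Int × α) (hpm : p ∈ r) (q : Int × α) (hqm : q ∈ r) (h : p.1 = q.1) : p = q := by
  induction r with
  | nil => simp at hpm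
  | cons a t ih =>
    rw [List.pairwise_cons] at hp
    rcases List.mem_cons.1 hpm with rfl | hpt <;> rcases List.mem_cons.1 hqm with rfl | hqt
    · rfl
    · exact absurd h (ne_of_lt (hp.1 q hqt))
    · exact absurd h.symm (ne_of_lt (hp.1 p hpt))
    · exact ih hp.2 hpt hqt

theorem tk_inj_on {α : Type} (L : Int) (key : α → Int) (ts : List (Int × α))
    (hmono : ts.Pairwise (fun p q => p.1 < q.1))
    (hbound : ∀ p ∈ ts, 0 ≤ p.1 ∧ p.1 < L) :
    ∀ p ∈ ts, ∀ q ∈ ts, tk L key p = tk L key q → p = q := by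
  intro p hp q hq h
  obtain ⟨hp0, hpL⟩ := hbound p hp
  obtain ⟨hq0, hqL⟩ := hbound q hq
  have hL : 0 < L := by omega
  have hieq : p.1 = q.1 := by
    unfold tk at h
    by_contra hne
    rcases lt_or_gt_of_ne hne with hlt | hlt
    · have hd : (key q.2 - key p.2) * L = q.1 - p.1 := by ring_nf; ring_nf at h; linarith
      have h3 : (1:Int) ≤ key q.2 - key p.2 := by
        by_contra hc
        have : (key q.2 - key p.2) * L ≤ 0 :=
          mul_nonpos_of_nonpos_of_nonneg (by omega) hL.le
        omega
      have := mul_le_mul_of_nonneg_right h3 hL.le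
      omega
    · have hd : (key p.2 - key q.2) * L = p.1 - q.1 := by ring_nf; ring_nf at h; linarith
      have h3 : (1:Int) ≤ key p.2 - key q.2 := by
        by_contra hc
        have : (key p.2 - key q.2) * L ≤ 0 :=
          mul_nonpos_of_nonpos_of_nonneg (by omega) hL.le
        omega
      have := mul_le_mul_of_nonneg_right h3 hL.le
      omega
  exact eq_of_fst_eq_of_pairwise ts hmono p hp q hq hieq

theorem sorted_rev_headtail {α : Type} (key : α → Int) (l1 l2 : List α) (m : α)
    (hmax : ∀ x ∈ l1 ++ m :: l2, key x ≤ key m) (hfirst : ∀ x ∈ l1, key x < key m) :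
    PySem.List.sorted (l1 ++ m :: l2) key true = m :: PySem.List.sorted (l1 ++ l2) key true := by
  set l := l1 ++ m :: l2 with hl
  set L : Int := (l.length : Int) with hL
  set i0 : Int := (l1.length : Int) with hi0
  have hlen : l.length = l1.length + l2.length + 1 := by simp [hl]; omega
  set ts : List (Int × α) := PySem.List.enumerate l 0 with hts
  set ts' : List (Int × α) :=
    PySem.List.enumerate l1 0 ++ PySem.List.enumerate l2 (i0 + 1) with hts2
  have hts_split : ts = PySem.List.enumerate l1 0 ++ (i0, m) :: PySem.List.enumerate l2 (i0 + 1) := by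
    rw [hts, hl, PySem.List.enumerate_append, PySem.List.enumerate_cons]
    simp [hi0]
  have hmono : ts.Pairwise (fun p q => p.1 < q.1) := PySem.List.pairwise_lt_enumerate l 0
  have hsub : ts'.Sublist ts := by
    rw [hts_split, hts2]
    exact (List.Sublist.refl _).append (List.sublist_cons_self _ _)
  have hmono2 : ts'.Pairwise (fun p q => p.1 < q.1) := hmono.sublist hsub
  have hbound : ∀ p ∈ ts, 0 ≤ p.1 ∧ p.1 < L := by
    intro p hp
    rw [hts, PySem.List.mem_enumerate_iff] at hp
    obtain ⟨k, hk, rfl⟩ := hp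
    refine ⟨by omega, by rw [hL]; omega⟩
  have hbound2 : ∀ p ∈ ts', 0 ≤ p.1 ∧ p.1 < L := fun p hp => hbound p (hsub.mem hp)
  have hgap : ∀ p ∈ ts, ∀ q ∈ ts, p.1 - q.1 < L := by
    intro p hp q hq
    obtain ⟨h1, h2⟩ := hbound p hp
    obtain ⟨h3, h4⟩ := hbound q hq
    omega
  have hgap2 : ∀ p ∈ ts', ∀ q ∈ ts', p.1 - q.1 < L :=
    fun p hp q hq => hgap p (hsub.mem hp) q (hsub.mem hq)
  have hmem_m : (i0, m) ∈ ts := by rw [hts_split]; simp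
  have hinj : ∀ p ∈ ts, ∀ q ∈ ts, tk L key p = tk L key q → p = q :=
    tk_inj_on L key ts hmono hbound
  -- head strictly below every element of ts'
  have hhead : ∀ q ∈ ts', tk L key (i0, m) < tk L key q := by
    intro q hq
    rw [hts2, List.mem_append] at hq
    rcases hq with hq | hq
    · -- q tags an element of l1: smaller index, strictly smaller key
      rw [PySem.List.mem_enumerate_iff] at hq
      obtain ⟨k, hk, rfl⟩ := hq
      have hx1 : l1[k] ∈ l1 := List.getElem_mem hk
      refine (tk_lt_iff L key (i0, m) (0 + (k : Int), l1[k]) ?_ ?_).2 (hfirst _ hx1)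
      · dsimp only; omega
      · dsimp only; omega
    · -- q tags an element of l2: bigger index, key ≤ key m
      rw [PySem.List.mem_enumerate_iff] at hq
      obtain ⟨k, hk, rfl⟩ := hq
      have hqmem : (i0 + 1 + (k : Int), l2[k]) ∈ ts := hsub.mem (by
        rw [hts2, List.mem_append]
        exact Or.inr ((PySem.List.mem_enumerate_iff _ _ _).2 ⟨k, hk, rfl⟩))
      have hx2 : l2[k] ∈ l2 := List.getElem_mem hk
      have hle : key l2[k] ≤ key m := hmax _ (by rw [hl]; simp [hx2])
      have hne : tk L key (i0 + 1 + (k : Int), l2[k]) ≠ tk L key (i0, m) := by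
        intro he
        have h7 := congrArg Prod.fst (hinj _ hqmem _ hmem_m he)
        omega
      have hnot : ¬ tk L key (i0 + 1 + (k : Int), l2[k]) < tk L key (i0, m) := by
        intro hcon
        have h8 := (tk_lt_iff L key (i0 + 1 + (k : Int), l2[k]) (i0, m)
          (by dsimp only; omega)
          (by obtain ⟨h5, h6⟩ := hbound _ hqmem; dsimp only at h5 h6 ⊢; omega)).1 hcon
        dsimp only at h8
        omega
      omega
  -- the tagged ascending sort of ts begins with (i0, m)
  have hmain : PySem.List.sorted ts (tk L key) false
      = (i0, m) :: PySem.List.sorted ts' (tk L key) false := by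
    apply PySem.List.sorted_eq_of_perm_of_pairwise_lt
    · refine ((PySem.List.sorted_perm ts' (tk L key) false).cons _).trans ?_
      rw [hts_split, hts2]
      exact List.perm_middle.symm
    · rw [List.pairwise_cons]
      refine ⟨fun q hq => hhead q ((PySem.List.mem_sorted ts' (tk L key) false q).1 hq), ?_⟩
      refine pairwise_lt_of_pairwise_le (tk L key) _ (PySem.List.sorted_pairwise ts' (tk L key)) ?_ ?_
      · exact ((PySem.List.sorted_perm ts' (tk L key) false).nodup_iff).2
          (hmono2.imp (fun h => ne_of_apply_ne Prod.fst (ne_of_lt h)))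
      · intro p hp q hq
        rw [PySem.List.mem_sorted] at hp hq
        exact hinj p (hsub.mem hp) q (hsub.mem hq)
  -- transport back through the tagging
  have h1 : PySem.List.sorted l key true = (PySem.List.sorted ts (tk L key) false).map (·.2) := by
    have := sorted_map_tag L key ts hmono (fun p hp q hq => hgap p hp q hq)
    rw [hts, PySem.List.map_snd_enumerate] at this
    exact this
  have h2 : PySem.List.sorted (l1 ++ l2) key true = (PySem.List.sorted ts' (tk L key) false).map (·.2) := by
    have := sorted_map_tag L key ts' hmono2 hgap2
    rw [hts2, List.map_append, PySem.List.map_snd_enumerate, PySem.List.map_snd_enumerate] at this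
    exact this
  rw [← hl] at *
  rw [h1, hmain, List.map_cons, ← h2]

theorem maxGo_first {α : Type} (key : α → Int) (xs : List α) : ∀ (c m : α),
    xs.foldl (fun acc x => match acc with
      | none => some x
      | some m => if key m < key x then some x else some m) (some c) = some m →
    m = c ∨ ∃ l1 l2, xs = l1 ++ m :: l2 ∧ key c < key m ∧ ∀ y ∈ l1, key y < key m := by
  induction xs with
  | nil => intro c m h; simp at h; exact Or.inl h.symm
  | cons x xs ih =>
    intro c m h
    rw [List.foldl_cons] at h
    by_cases hcx : key c < key x
    · simp only [hcx, if_true] at h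
      rcases ih x m h with rfl | ⟨l1, l2, rfl, h1, h2⟩
      · exact Or.inr ⟨[], xs, rfl, hcx, by simp⟩
      · exact Or.inr ⟨x :: l1, l2, rfl, lt_trans hcx h1, by
          intro y hy
          rcases List.mem_cons.1 hy with rfl | hy
          · exact h1
          · exact h2 y hy⟩
    · simp only [hcx, if_false] at h
      rcases ih c m h with rfl | ⟨l1, l2, rfl, h1, h2⟩
      · exact Or.inl rfl
      · exact Or.inr ⟨x :: l1, l2, rfl, h1, by
          intro y hy
          rcases List.mem_cons.1 hy with rfl | hy
          · omega
          · exact h2 y hy⟩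

theorem max?_first {α : Type} (key : α → Int) (l : List α) (m : α)
    (h : PySem.List.max? l key = some m) :
    ∃ l1 l2, l = l1 ++ m :: l2 ∧ ∀ x ∈ l1, key x < key m := by
  cases l with
  | nil => simp [PySem.List.max?] at h
  | cons x xs =>
    simp only [PySem.List.max?, List.foldl_cons] at h
    rcases maxGo_first key xs x m h with rfl | ⟨l1, l2, rfl, h1, h2⟩
    · exact ⟨[], xs, rfl, by simp⟩
    · exact ⟨x :: l1, l2, rfl, by
        intro y hy
        rcases List.mem_cons.1 hy with rfl | hy
        · exact h1
        · exact h2 y hy⟩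

theorem maxGo_map {α β : Type} (f : α → β) (keyb : β → Int) (keya : α → Int) :
    ∀ (xs : List α), (∀ p ∈ xs, keyb (f p) = keya p) →
    ∀ (acc : Option α), (∀ c, acc = some c → keyb (f c) = keya c) →
    xs.foldl (fun a x => match a with
      | none => some (f x)
      | some m => if keyb m < keyb (f x) then some (f x) else some m) (acc.map f)
    = (xs.foldl (fun a x => match a with
      | none => some x
      | some m => if keya m < keya x then some x else some m) acc).map f := by
  intro xs
  induction xs with
  | nil => intro _ acc _; simp
  | cons x t ih =>
    intro hxs acc hacc
    rw [List.foldl_cons, List.foldl_cons]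
    cases acc with
    | none =>
      exact ih (fun p hp => hxs p (by simp [hp])) (some x)
        (fun c hc => by cases hc; exact hxs x (by simp))
    | some c =>
      have hcnd : (keyb (f c) < keyb (f x)) = (keya c < keya x) := by
        rw [hacc c rfl, hxs x (by simp)]
      simp only [Option.map_some]
      by_cases hk : keya c < keya x
      · have : keyb (f c) < keyb (f x) := by rw [hcnd]; exact hk
        simp only [hk, this, if_true]
        exact ih (fun p hp => hxs p (by simp [hp])) (some x)
          (fun d hd => by cases hd; exact hxs x (by simp))
      · have : ¬ keyb (f c) < keyb (f x) := by rw [hcnd]; exact hk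
        simp only [hk, this, if_false]
        exact ih (fun p hp => hxs p (by simp [hp])) (some c) hacc

theorem max?_map_comp {α β : Type} (f : α → β) (keyb : β → Int) (keya : α → Int) (l : List α)
    (hagree : ∀ p ∈ l, keyb (f p) = keya p) :
    PySem.List.max? (l.map f) keyb = (PySem.List.max? l keya).map f := by
  simp only [PySem.List.max?, List.foldl_map]
  exact maxGo_map f keyb keya l hagree none (by simp)

theorem max?_keys_getD (l : List (String × Int)) (hnd : (l.map Prod.fst).Nodup) :
    PySem.List.max? (PySem.Dict.mk l).keys (fun k => (PySem.Dict.mk l).getD k 0)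
      = (PySem.List.max? l (fun p => p.2)).map Prod.fst := by
  have hkeys : (PySem.Dict.mk l).keys = l.map Prod.fst := rfl
  rw [hkeys]
  exact max?_map_comp Prod.fst _ _ l
    (fun p hp => PySem.Dict.getD_of_mem_items (PySem.Dict.mk l) (by exact hp) hnd 0)

theorem loop_eq_n : ∀ (n : Nat) (l : List (String × Int)), l.length = n →
    (l.map Prod.fst).Nodup → ∀ (i : Int) (acc : List String),
    nbpLoop (PySem.Dict.mk l) i n acc
      = acc ++ (PySem.List.enumerate (PySem.List.sorted l (fun p => p.2) true) i).flatMap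
          (fun p => [PySem.Int.toStr (1 + p.1) ++ ". " ++ p.2.1 ++ ": ", PySem.Int.toStr p.2.2, "\n"]) := by
  intro n
  induction n with
  | zero =>
    intro l hlen hnd i acc
    rw [List.length_eq_zero_iff] at hlen
    subst hlen
    simp [nbpLoop, PySem.List.sorted]
  | succ n ih =>
    intro l hlen hnd i acc
    have hne : l ≠ [] := by intro h; subst h; simp at hlen
    obtain ⟨m, hm⟩ : ∃ m, PySem.List.max? l (fun p => p.2) = some m := by
      cases hmx : PySem.List.max? l (fun p => p.2) with
      | none => exact absurd ((PySem.List.max?_eq_none_iff _ _).1 hmx) hne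
      | some m => exact ⟨m, rfl⟩
    have hmmem : m ∈ l := PySem.List.max?_mem hm
    have hkeys : PySem.List.max? (PySem.Dict.mk l).keys (fun k => (PySem.Dict.mk l).getD k 0) = some m.1 := by
      rw [max?_keys_getD l hnd, hm]; rfl
    have hgetm : (PySem.Dict.mk l).getD m.1 0 = m.2 := by
      refine PySem.Dict.getD_of_mem_items (PySem.Dict.mk l) ?_ hnd 0
      exact (by simpa using hmmem)
    obtain ⟨l1, l2, hdec, hfirst⟩ := max?_first (fun p => p.2) l m hm
    have hmax : ∀ x ∈ l1 ++ m :: l2, x.2 ≤ m.2 := by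
      intro x hx
      exact PySem.List.max?_isMax hm x (hdec ▸ hx)
    -- erased dict = dict of l1 ++ l2
    have hnodup_fst : ¬ (m.1 ∈ (l1 ++ l2).map Prod.fst) := by
      subst hdec
      rw [List.map_append, List.map_cons] at hnd
      have h := List.nodup_middle.1 hnd
      rw [List.nodup_cons] at h
      simpa [List.map_append] using h.1
    have hfilter : l.filter (fun p => !(p.1 == m.1)) = l1 ++ l2 := by
      subst hdec
      rw [List.filter_append, List.filter_cons]
      simp only [List.map_append, List.mem_append] at hnodup_fst
      rw [List.filter_eq_self.2 (fun p hp => by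
        have : p.1 ≠ m.1 := fun e => hnodup_fst (Or.inl (e ▸ List.mem_map_of_mem hp))
        simp [this])]
      rw [List.filter_eq_self.2 (fun p hp => by
        have : p.1 ≠ m.1 := fun e => hnodup_fst (Or.inr (e ▸ List.mem_map_of_mem hp))
        simp [this])]
      simp
    have herase : (PySem.Dict.mk l).erase m.1 = PySem.Dict.mk (l1 ++ l2) := by
      show PySem.Dict.mk (l.filter (fun p => !(p.1 == m.1))) = PySem.Dict.mk (l1 ++ l2)
      rw [hfilter]
    have hlen2 : (l1 ++ l2).length = n := by
      subst hdec; simp at hlen ⊢; omega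
    have hnd2 : ((l1 ++ l2).map Prod.fst).Nodup := by
      subst hdec
      rw [List.map_append, List.map_cons] at hnd
      have h := List.nodup_middle.1 hnd
      rw [List.nodup_cons] at h
      simpa [List.map_append] using h.2
    have hstep : nbpLoop (PySem.Dict.mk l) i (n + 1) acc
        = nbpLoop (PySem.Dict.mk (l1 ++ l2)) (i + 1) n
            (acc ++ [PySem.Int.toStr (1 + i) ++ ". " ++ m.1 ++ ": ", PySem.Int.toStr m.2, "
"]) := by
      simp only [nbpLoop]
      rw [hkeys]
      simp only [hgetm, herase]
    rw [hstep, ih (l1 ++ l2) hlen2 hnd2 (i + 1) _]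
    rw [show l = l1 ++ m :: l2 from hdec]
    rw [sorted_rev_headtail (fun p : String × Int => p.2) l1 l2 m hmax hfirst]
    rw [PySem.List.enumerate_cons, List.flatMap_cons]
    simp

theorem join_empty_chars (parts : List (List Char)) : PySem.Chars.join [] parts = parts.flatten := by
  simp only [PySem.Chars.join, List.intercalate]
  induction parts with
  | nil => rfl
  | cons a t ih => cases t <;> simp_all [List.intersperse]

theorem join_chunks (es : List (Int × (String × Int))) :
    PySem.Str.join "" (es.flatMap
        (fun p => [PySem.Int.toStr (1 + p.1) ++ ". " ++ p.2.1 ++ ": ", PySem.Int.toStr p.2.2, "\n"]))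
      = PySem.Str.join "" (es.map
        (fun p => PySem.Int.toStr (1 + p.1) ++ ". " ++ p.2.1 ++ ": " ++ PySem.Int.toStr p.2.2 ++ "\n")) := by
  rw [← String.toList_inj, PySem.Str.toList_join, PySem.Str.toList_join,
      show "".toList = ([] : List Char) from rfl, join_empty_chars, join_empty_chars]
  induction es with
  | nil => rfl
  | cons p t ih => simp_all [String.toList_append]

theorem nbp_eq_alt (l : List (String × Int)) (hnd : (l.map Prod.fst).Nodup) :
    names_by_popularity l = names_by_popularity_alt l := by
  unfold names_by_popularity names_by_popularity_alt
  rw [loop_eq_n l.length l rfl hnd 0 [], PySem.List.foldl_append_singleton_eq_map]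
  rw [List.nil_append, List.nil_append]
  exact join_chunks _

-- ===== VERDICT (by name: the statement is the Claim_ definition above) =====
theorem names_by_popularity_spec : Claim_equal_names_by_popularity :=
  fun l _ hnd => nbp_eq_alt l hnd
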